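-- pv_equiv track=rewrite | github.com/MetricsGrimoire/Automator | create_projects.py | get_project_children
-- ===== SOURCE A (Python) =====
-- def get_project_children(project_key, projects):
--     """returns and array with the project names of its children"""
--     children = []
--     for project in projects:
--         data = projects[project]
--         if not 'parent_project' in data: return children
--         if (len(data['parent_project']) == 0):
--             continue
--         else:
--             parent = data['parent_project'][0]['id']
--             if parent == project_key:
--                 children.append(project)
--                 children += get_project_children(project, projects)
--     return children
-- ===== SOURCE B (Python) =====
-- def get_project_children(project_key, projects):
--     """returns and array with the project names of its children"""
--     # One pass builds a parent-id -> [child names] index over the prefix the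
--     # original scans (it stops at the first project lacking 'parent_project'),
--     # then a single DFS over the index emits the descendants in preorder.
--     index = {}
--     for name, data in projects.items():
--         if 'parent_project' not in data:
--             break
--         pp = data['parent_project']
--         if pp:
--             index.setdefault(pp[0]['id'], []).append(name)
--
--     def dfs(key):
--         return [x for c in index.get(key, []) for x in (c, *dfs(c))]
--
--     return dfs(project_key)
-- ===== Notes on version B (the rewrite author's own statement) =====
-- stated objective: alternative
-- what changed: A re-scans the whole projects dict inside every recursive call; B builds a parent-id -> children index in one pass over the prefix A scans (up to the first project without 'parent_project') and then does a single DFS over that index, so no call ever re-scans the dict.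
import Mathlib
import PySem

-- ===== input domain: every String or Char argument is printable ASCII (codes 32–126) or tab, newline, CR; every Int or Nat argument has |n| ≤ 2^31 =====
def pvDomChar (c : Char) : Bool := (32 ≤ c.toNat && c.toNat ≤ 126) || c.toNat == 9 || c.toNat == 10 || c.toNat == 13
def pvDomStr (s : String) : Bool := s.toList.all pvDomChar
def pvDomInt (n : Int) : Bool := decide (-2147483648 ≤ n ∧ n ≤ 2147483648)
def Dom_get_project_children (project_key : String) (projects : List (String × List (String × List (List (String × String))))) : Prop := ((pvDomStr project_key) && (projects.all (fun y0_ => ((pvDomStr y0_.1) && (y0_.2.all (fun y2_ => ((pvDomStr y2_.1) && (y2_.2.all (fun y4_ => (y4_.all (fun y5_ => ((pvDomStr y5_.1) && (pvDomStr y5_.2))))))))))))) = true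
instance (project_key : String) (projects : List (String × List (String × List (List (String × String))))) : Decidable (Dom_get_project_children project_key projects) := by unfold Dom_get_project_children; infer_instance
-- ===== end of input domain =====

-- B replaces A's re-scan of the whole dict inside every recursive call by a parent-id → children
-- index built in one pass over the scanned prefix, followed by a single DFS (objective:
-- alternative). Both ports carry a fuel argument (projects.length + 1) that only makes the
-- recursion total in Lean; on the inputs admitted by Pre_ it is never exhausted.

-- dict[k] / 'k in dict' on an association list: first match (keys are unique in a Python dict)
def pvLook {α : Type} (l : List (String × α)) (k : String) : Option α :=
  (l.find? (fun p => p.1 == k)).map (·.2)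

-- ===== PORT A =====
-- the body of A's 'for project in projects' loop; 'recur' is the recursive call at one less fuel.
-- Python raises KeyError where pl[0] has no 'id' key; the port's '.getD ""' there is excluded by Pre_.
def pyAloop (recur : String → List String) (project_key : String)
    (projects : List (String × List (String × List (List (String × String))))) :
    List (String × List (String × List (List (String × String)))) → List String → List String
  | [], children => children
  | (project, _) :: rest, children =>
    let data := (pvLook projects project).getD []
    match pvLook data "parent_project" with
    | none => children
    | some pl =>
      if pl.length = 0 then pyAloop recur project_key projects rest children
      else
        let parent := (pvLook (pl.headD []) "id").getD ""
        if parent == project_key then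
          pyAloop recur project_key projects rest (children ++ [project] ++ recur project)
        else
          pyAloop recur project_key projects rest children

def pyA : Nat → String → List (String × List (String × List (List (String × String)))) → List String
  | 0, _, _ => []
  | Nat.succ f, project_key, projects =>
      pyAloop (fun k => pyA f k projects) project_key projects projects []

def get_project_children (project_key : String) (projects : List (String × List (String × List (List (String × String))))) : List String :=
  pyA (projects.length + 1) project_key projects

-- ===== PORT B =====
-- the prefix of items() B's for-loop scans before its 'break' (first project lacking 'parent_project')
def pvScan (projects : List (String × List (String × List (List (String × String))))) :
    List (String × List (String × List (List (String × String)))) :=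
  projects.takeWhile (fun pr => (pr.2.lookup "parent_project").isSome)

-- loop body: if pp: index.setdefault(pp[0]['id'], []).append(name)
-- Python raises KeyError where pp[0] has no 'id' key; the '.getD ""' there is excluded by Pre_.
def pvIndexStep (index : PySem.Dict String (List String))
    (pr : String × List (String × List (List (String × String)))) : PySem.Dict String (List String) :=
  match pr.2.lookup "parent_project" with
  | some (e :: _) =>
      let pid := (e.lookup "id").getD ""
      index.insert pid (index.getD pid [] ++ [pr.1])
  | _ => index

def pvIndex (scanned : List (String × List (String × List (List (String × String))))) :
    PySem.Dict String (List String) :=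
  scanned.foldl pvIndexStep PySem.Dict.empty

-- dfs(key) = [x for c in index.get(key, []) for x in (c, *dfs(c))]; fuel only for totality
def pvDfs (index : PySem.Dict String (List String)) : Nat → String → List String
  | 0, _ => []
  | Nat.succ f, key => (index.getD key []).flatMap (fun c => c :: pvDfs index f c)

def get_project_children_alt (project_key : String)
    (projects : List (String × List (String × List (List (String × String))))) : List String :=
  pvDfs (pvIndex (pvScan projects)) (projects.length + 1) project_key

-- ===== PRECONDITION & SPEC =====
-- helpers for Pre_: the parent_project list of a key, the prefix A's loop scans, one parent step
def pvPl (projects : List (String × List (String × List (List (String × String))))) (k : String) :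
    Option (List (List (String × String))) :=
  pvLook ((pvLook projects k).getD []) "parent_project"

def pvPrefix (projects : List (String × List (String × List (List (String × String))))) :
    List (String × List (String × List (List (String × String)))) :=
  projects.takeWhile (fun pr => (pvPl projects pr.1).isSome)

def pvStep (projects : List (String × List (String × List (List (String × String))))) (k : String) : Option String :=
  match pvLook (pvPrefix projects) k with
  | none => none
  | some _ =>
    match pvPl projects k with
    | none => none
    | some [] => none
    | some (e :: _) => pvLook e "id"

def pvIter (projects : List (String × List (String × List (List (String × String))))) :
    Nat → String → Option String
  | 0, k => some k
  | Nat.succ n, k =>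
    match pvStep projects k with
    | none => none
    | some p => pvIter projects n p

-- Pre_ excludes exactly: (a) association lists with duplicate keys, which represent no Python dict
-- (a defensible corner of the dict→list convention, not a value of A); (b) inputs on which Python A
-- raises: a scanned entry whose non-empty parent_project lacks an 'id' key in its first element
-- (KeyError), and project_key lying on a parent-pointer cycle (infinite recursion, RecursionError).
def Pre_get_project_children (project_key : String) (projects : List (String × List (String × List (List (String × String))))) : Prop :=
  (projects.map Prod.fst).Nodup ∧
  (∀ pr ∈ pvPrefix projects,
      ((pvPl projects pr.1).getD []) ≠ [] →
      (pvLook (((pvPl projects pr.1).getD []).headD []) "id").isSome) ∧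
  (∀ i ∈ List.range (pvPrefix projects).length,
      pvIter projects (i + 1) project_key ≠ some project_key)

instance (project_key : String) (projects : List (String × List (String × List (List (String × String))))) : Decidable (Pre_get_project_children project_key projects) := by
  unfold Pre_get_project_children; infer_instance

def pvWitness_get_project_children : String × (List (String × List (String × List (List (String × String))))) :=
  ("p", [("c", [("parent_project", [[("id", "p")]])])])

def Spec_get_project_children (project_key : String) (projects : List (String × List (String × List (List (String × String))))) (out : List String) : Prop := out = get_project_children_alt project_key projects
instance (project_key : String) (projects : List (String × List (String × List (List (String × String))))) (out : List String) : Decidable (Spec_get_project_children project_key projects out) := by unfold Spec_get_project_children; infer_instance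

-- ===== CLAIM (what is proved, stated in full; the proofs are below) =====
def Claim_equal_get_project_children : Prop := ∀ (project_key : String) (projects : List (String × List (String × List (List (String × String))))), Dom_get_project_children project_key projects → Pre_get_project_children project_key projects → Spec_get_project_children project_key projects (get_project_children project_key projects)

-- ===== LEMMAS AND PROOFS =====

theorem pvLook_eq_lookup {α : Type} (l : List (String × α)) (k : String) :
    pvLook l k = l.lookup k := by
  induction l with
  | nil => rfl
  | cons p rest ih =>
    by_cases h : p.1 = k
    · simp [pvLook, List.lookup, h]
    · simp only [pvLook, List.lookup]
      rw [List.find?_cons_of_neg (by simp [h]),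
          show (k == p.1) = false from beq_eq_false_iff_ne.mpr (Ne.symm h)]
      exact ih

theorem nodup_pvLook {α : Type} (l : List (String × α)) (h : (l.map Prod.fst).Nodup)
    (pr : String × α) (hm : pr ∈ l) : pvLook l pr.1 = some pr.2 := by
  induction l with
  | nil => cases hm
  | cons q rest ih =>
    simp only [List.map, List.nodup_cons] at h
    rcases List.mem_cons.mp hm with rfl | hm'
    · simp [pvLook, List.find?]
    · have hne : q.1 ≠ pr.1 := by
        intro he
        exact h.1 (he ▸ List.mem_map.mpr ⟨pr, hm', rfl⟩)
      simp only [pvLook, List.find?]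
      rw [show (q.1 == pr.1) = false from beq_eq_false_iff_ne.mpr hne]
      exact ih h.2 hm'

-- the children of `key` contributed by one scan of `rest` (A's loop stripped of its recursion)
def kidsOf (projects : List (String × List (String × List (List (String × String))))) (key : String) :
    List (String × List (String × List (List (String × String)))) → List String
  | [] => []
  | (project, _) :: rest =>
    let data := (pvLook projects project).getD []
    match pvLook data "parent_project" with
    | none => []
    | some pl =>
      if pl.length = 0 then kidsOf projects key rest
      else if (pvLook (pl.headD []) "id").getD "" == key then
        project :: kidsOf projects key rest
      else
        kidsOf projects key rest

theorem pyAloop_eq_kids (recur : String → List String) (pk : String)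
    (projects : List (String × List (String × List (List (String × String)))))
    (rest : List (String × List (String × List (List (String × String)))))
    (acc : List String) :
    pyAloop recur pk projects rest acc
      = acc ++ (kidsOf projects pk rest).flatMap (fun c => c :: recur c) := by
  induction rest generalizing acc with
  | nil => simp [pyAloop, kidsOf]
  | cons pr rest ih =>
    obtain ⟨project, d⟩ := pr
    simp only [pyAloop, kidsOf]
    cases hpp : pvLook ((pvLook projects project).getD []) "parent_project" with
    | none => simp
    | some pl =>
      by_cases hlen : pl.length = 0
      · simp [hlen, ih]
      · simp only [if_neg hlen, ih]
        split_ifs with hpar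
        · simp
        · rfl

theorem pvIndex_foldl_getD
    (projects : List (String × List (String × List (List (String × String)))))
    (rest : List (String × List (String × List (List (String × String)))))
    (h : ∀ pr ∈ rest, pvLook projects pr.1 = some pr.2)
    (idx : PySem.Dict String (List String)) (k : String) :
    ((rest.takeWhile (fun pr => (pr.2.lookup "parent_project").isSome)).foldl pvIndexStep idx).getD k []
      = idx.getD k [] ++ kidsOf projects k rest := by
  induction rest generalizing idx with
  | nil => simp [kidsOf]
  | cons pr rest ih =>
    obtain ⟨name, data⟩ := pr
    have h0 : pvLook projects name = some data := h (name, data) (List.mem_cons_self ..)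
    have ht : ∀ q ∈ rest, pvLook projects q.1 = some q.2 := fun q hq => h q (List.mem_cons_of_mem _ hq)
    simp only [kidsOf, h0, Option.getD_some, pvLook_eq_lookup]
    cases hpp : data.lookup "parent_project" with
    | none => simp [List.takeWhile, hpp]
    | some pl =>
      rw [List.takeWhile]
      simp only [hpp, Option.isSome_some, List.foldl_cons]
      cases pl with
      | nil =>
        have hstep : pvIndexStep idx (name, data) = idx := by
          simp [pvIndexStep, hpp]
        rw [hstep, ih ht]; simp
      | cons e es =>
        have hstep : pvIndexStep idx (name, data)
            = idx.insert ((e.lookup "id").getD "") (idx.getD ((e.lookup "id").getD "") [] ++ [name]) := by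
          simp [pvIndexStep, hpp]
        rw [hstep, ih ht]
        simp only [List.length_cons, List.headD_cons]
        rw [if_neg (by omega), PySem.Dict.getD_insert]
        by_cases hk : ((e.lookup "id").getD "") = k
        · subst hk; simp [List.append_assoc]
        · rw [if_neg (Ne.symm hk), if_neg (by simpa using hk)]

theorem pvIndex_getD
    (projects : List (String × List (String × List (List (String × String)))))
    (h : (projects.map Prod.fst).Nodup) (k : String) :
    (pvIndex (pvScan projects)).getD k [] = kidsOf projects k projects := by
  have := pvIndex_foldl_getD projects projects
    (fun pr hpr => nodup_pvLook projects h pr hpr) PySem.Dict.empty k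
  simpa [pvIndex, pvScan] using this

theorem pyA_eq_pvDfs (projects : List (String × List (String × List (List (String × String)))))
    (h : (projects.map Prod.fst).Nodup) (f : Nat) (key : String) :
    pyA f key projects = pvDfs (pvIndex (pvScan projects)) f key := by
  induction f generalizing key with
  | zero => rfl
  | succ f ih =>
    calc pyA (f + 1) key projects
        = (kidsOf projects key projects).flatMap (fun c => c :: pyA f c projects) := by
          simp only [pyA]; rw [pyAloop_eq_kids]; simp
      _ = ((pvIndex (pvScan projects)).getD key []).flatMap
            (fun c => c :: pvDfs (pvIndex (pvScan projects)) f c) := by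
          rw [pvIndex_getD projects h,
            show (fun c => c :: pyA f c projects)
               = fun c => c :: pvDfs (pvIndex (pvScan projects)) f c
             from funext fun c => by rw [ih]]
      _ = pvDfs (pvIndex (pvScan projects)) (f + 1) key := rfl

-- ===== VERDICT (by name: the statement is the Claim_ definition above) =====
theorem get_project_children_spec : Claim_equal_get_project_children := by
  intro project_key projects _ hpre
  unfold Spec_get_project_children get_project_children get_project_children_alt
  exact pyA_eq_pvDfs projects hpre.1 (projects.length + 1) project_key
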